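-- pv_equiv track=rewrite | github.com/SKNETWORKS-FAMILY-AICAMP/SKN13-FINAL-1TEAM | FinalProject/backend/etc/llm_tools/edit_hwpx.py | _parse_legacy_format
-- ===== SOURCE A (Python) =====
-- from typing import List, Tuple, Optional
--
-- def _parse_legacy_format(content: str, original_paragraphs: List[str]) -> List[str]:
--     """기존 형식 파싱 (폴백용)"""
--     revisions = {}
--
--     for line in content.splitlines():
--         line = line.strip()
--         if line.startswith('[') and ']' in line:
--             bracket_end = line.find(']')
--             if bracket_end > 1:
--                 key = line[1:bracket_end].strip()
--                 content_part = line[bracket_end+1:].strip()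
--
--                 if key.isdigit():
--                     idx = int(key)
--                     if 0 <= idx < len(original_paragraphs):
--                         revisions[idx] = content_part
--
--     # 수정된 내용 적용
--     result = original_paragraphs.copy()
--     for idx, new_content in revisions.items():
--         result[idx] = new_content
--
--     return result
-- ===== SOURCE B (Python) =====
-- from typing import List, Optional, Tuple
--
--
-- def _parse_line(line: str, n: int) -> Optional[Tuple[int, str]]:
--     """Parse one '[idx] text' line; None if it is not a valid in-bounds override."""
--     s = line.strip()
--     if not (s.startswith('[') and ']' in s):
--         return None
--     j = s.find(']')
--     if j <= 1:
--         return None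
--     key = s[1:j].strip()
--     if not key.isdigit():
--         return None
--     idx = int(key)
--     if not (0 <= idx < n):
--         return None
--     return idx, s[j + 1:].strip()
--
--
-- def _parse_legacy_format(content: str, original_paragraphs: List[str]) -> List[str]:
--     # Scan the lines BACK TO FRONT with first-write-wins: the last valid override
--     # of an index in the file is the first one met, so it is written straight into
--     # the result and any earlier override of the same index is skipped via `seen`.
--     result = list(original_paragraphs)
--     n = len(result)
--     seen = set()
--     for line in reversed(content.splitlines()):
--         a = _parse_line(line, n)
--         if a is None:
--             continue
--         idx, text = a
--         if idx in seen:
--             continue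
--         seen.add(idx)
--         result[idx] = text
--     return result
-- ===== Notes on version B (the rewrite author's own statement) =====
-- stated objective: alternative
-- what changed: B scans the lines back to front with a seen-set and first-write-wins, writing straight into a copy of original_paragraphs, instead of A's forward pass that stages overrides in a dict and applies them in a second loop; equivalent because the dict makes the last forward write win, which is exactly the first write met in reverse order.
import Mathlib
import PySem

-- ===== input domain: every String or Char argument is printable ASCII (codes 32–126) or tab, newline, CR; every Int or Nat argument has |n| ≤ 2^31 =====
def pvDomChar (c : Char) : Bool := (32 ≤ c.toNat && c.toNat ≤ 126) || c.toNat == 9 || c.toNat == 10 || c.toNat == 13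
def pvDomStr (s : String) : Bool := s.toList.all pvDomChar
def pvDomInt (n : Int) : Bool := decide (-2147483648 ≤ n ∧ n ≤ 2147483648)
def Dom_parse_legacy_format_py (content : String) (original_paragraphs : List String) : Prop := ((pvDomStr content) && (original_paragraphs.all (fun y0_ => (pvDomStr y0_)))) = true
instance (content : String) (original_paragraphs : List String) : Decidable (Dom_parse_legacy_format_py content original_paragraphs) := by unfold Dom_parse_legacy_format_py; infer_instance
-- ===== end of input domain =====

-- B scans the lines back to front with a seen-set (first write wins) and assigns straight
-- into a copy of original_paragraphs, instead of A's forward dict staging + second loop.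

-- ===== PORT A =====
-- literal transliteration of _parse_legacy_format: build a dict of revisions, then apply it
def parse_legacy_format_py (content : String) (original_paragraphs : List String) : List String :=
  let revisions : PySem.Dict Int String :=
    (PySem.Str.splitlines content).foldl (fun revisions rawline =>
      let line := PySem.Str.strip rawline
      if (PySem.Str.startswith line "[" && PySem.Str.isIn "]" line) = true then
        let bracket_end := PySem.Str.find line "]"
        if bracket_end > 1 then
          let key := PySem.Str.strip (PySem.Str.slice line (some 1) (some bracket_end))
          let content_part := PySem.Str.strip (PySem.Str.slice line (some (bracket_end + 1)) none)
          if PySem.Str.strIsdigit key = true then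
            match PySem.Int.ofStr? key with  -- int(key); key.isdigit() guarantees a value
            | some idx =>
              if 0 ≤ idx ∧ idx < (original_paragraphs.length : Int) then
                revisions.insert idx content_part
              else revisions
            | none => revisions
          else revisions
        else revisions
      else revisions) PySem.Dict.empty
  revisions.items.foldl (fun result p => PySem.List.pySetD result p.1 p.2) original_paragraphs

-- ===== PORT B =====
-- transliteration of Source B's _parse_line: parse one line to an optional (idx, text) override
def pvParseLine? (line : String) (n : Int) : Option (Int × String) :=
  let s := PySem.Str.strip line
  if ¬ (PySem.Str.startswith s "[" && PySem.Str.isIn "]" s) = true then none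
  else
    let j := PySem.Str.find s "]"
    if j ≤ 1 then none
    else
      let key := PySem.Str.strip (PySem.Str.slice s (some 1) (some j))
      if ¬ PySem.Str.strIsdigit key = true then none
      else
        match PySem.Int.ofStr? key with  -- int(key); key.isdigit() guarantees a value
        | some idx =>
          if ¬ (0 ≤ idx ∧ idx < n) then none
          else some (idx, PySem.Str.strip (PySem.Str.slice s (some (j + 1)) none))
        | none => none

-- transliteration of Source B's _parse_legacy_format: reversed scan, seen-set, first write wins
def parse_legacy_format_py_alt (content : String) (original_paragraphs : List String) : List String :=
  let n : Int := original_paragraphs.length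
  ((PySem.Str.splitlines content).reverse.foldl
    (fun (st : PySem.Set Int × List String) line =>
      match pvParseLine? line n with
      | some a =>
        if PySem.Set.contains st.1 a.1 then st
        else (PySem.Set.add st.1 a.1, PySem.List.pySetD st.2 a.1 a.2)
      | none => st)
    (PySem.Set.empty, original_paragraphs)).2

-- ===== PRECONDITION & SPEC =====
def Spec_parse_legacy_format_py (content : String) (original_paragraphs : List String) (out : List String) : Prop := out = parse_legacy_format_py_alt content original_paragraphs
instance (content : String) (original_paragraphs : List String) (out : List String) : Decidable (Spec_parse_legacy_format_py content original_paragraphs out) := by unfold Spec_parse_legacy_format_py; infer_instance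

-- ===== CLAIM (what is proved, stated in full; the proofs are below) =====
def Claim_equal_parse_legacy_format_py : Prop := ∀ (content : String) (original_paragraphs : List String), Dom_parse_legacy_format_py content original_paragraphs → Spec_parse_legacy_format_py content original_paragraphs (parse_legacy_format_py content original_paragraphs)

-- ===== LEMMAS AND PROOFS =====

-- forward last-write-wins application of a list of (index, text) overrides
def pvFwd (ps : List (Int × String)) (r : List String) : List String :=
  ps.foldl (fun result p => PySem.List.pySetD result p.1 p.2) r

theorem pvFwd_cons (p : Int × String) (ps : List (Int × String)) (r : List String) :
    pvFwd (p :: ps) r = pvFwd ps (PySem.List.pySetD r p.1 p.2) := rfl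

theorem pvParseLine?_nonneg {line : String} {n : Int} {a : Int × String}
    (h : pvParseLine? line n = some a) : 0 ≤ a.1 := by
  unfold pvParseLine? at h
  simp only [] at h
  split_ifs at h with h1 h2 h3
  cases hof : PySem.Int.ofStr? (PySem.Str.strip (PySem.Str.slice (PySem.Str.strip line) (some 1)
      (some (PySem.Str.find (PySem.Str.strip line) "]")))) with
  | none => rw [hof] at h; exact absurd h (by simp)
  | some idx =>
    rw [hof] at h
    dsimp only at h
    split_ifs at h with h4
    cases h
    exact h4.1

-- A's per-line dict step equals staging through pvParseLine?
theorem pvLineA_eq (n : Int) (d : PySem.Dict Int String) (rawline : String) :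
    (let line := PySem.Str.strip rawline
     if (PySem.Str.startswith line "[" && PySem.Str.isIn "]" line) = true then
       let bracket_end := PySem.Str.find line "]"
       if bracket_end > 1 then
         let key := PySem.Str.strip (PySem.Str.slice line (some 1) (some bracket_end))
         let content_part := PySem.Str.strip (PySem.Str.slice line (some (bracket_end + 1)) none)
         if PySem.Str.strIsdigit key = true then
           match PySem.Int.ofStr? key with
           | some idx => if 0 ≤ idx ∧ idx < n then d.insert idx content_part else d
           | none => d
         else d
       else d
     else d)
    = match pvParseLine? rawline n with
      | some a => d.insert a.1 a.2
      | none => d := by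
  unfold pvParseLine?
  simp only []
  set s := PySem.Str.strip rawline with hs
  by_cases hst : (PySem.Str.startswith s "[" && PySem.Str.isIn "]" s) = true
  · rw [if_pos hst, if_neg (not_not_intro hst)]
    set j := PySem.Str.find s "]" with hjd
    by_cases hj1 : j > 1
    · rw [if_pos hj1, if_neg (show ¬ j ≤ 1 by omega)]
      set key := PySem.Str.strip (PySem.Str.slice s (some 1) (some j)) with hk
      by_cases hd : PySem.Str.strIsdigit key = true
      · rw [if_pos hd, if_neg (not_not_intro hd)]
        cases hof : PySem.Int.ofStr? key with
        | none => rfl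
        | some idx =>
          dsimp only
          by_cases hb : 0 ≤ idx ∧ idx < n
          · rw [if_pos hb, if_neg (not_not_intro hb)]
          · rw [if_neg hb, if_pos hb]
      · rw [if_neg hd, if_pos hd]
    · rw [if_neg hj1, if_pos (show j ≤ 1 by omega)]
  · rw [if_neg hst, if_pos hst]

-- setting an index commutes out of a fold of sets at other nonnegative indices
theorem pvFoldl_set_comm (ps : List (Int × String)) (i : Int) (v : String)
    (hi : 0 ≤ i) (h : ∀ p ∈ ps, 0 ≤ p.1 ∧ p.1 ≠ i) : ∀ (r : List String),
    pvFwd ps (PySem.List.pySetD r i v) = PySem.List.pySetD (pvFwd ps r) i v := by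
  induction ps with
  | nil => intro r; rfl
  | cons p ps ih =>
    intro r
    have hp := h p (by simp)
    simp only [pvFwd, List.foldl_cons]
    rw [PySem.List.pySetD_of_nonneg _ _ hi, PySem.List.pySetD_of_nonneg _ _ hp.1,
        List.set_comm v p.2 (show i.toNat ≠ p.1.toNat by omega),
        ← PySem.List.pySetD_of_nonneg _ _ hi, ← PySem.List.pySetD_of_nonneg _ _ hp.1]
    exact ih (fun q hq => h q (by simp [hq])) _

-- key lemma H: hiding index i behind the seen-set and pre-setting it equals
-- applying the unhidden overrides first and setting i last
theorem pvHide_set (ps : List (Int × String)) (i : Int) (v : String) (hi : 0 ≤ i)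
    (hpos : ∀ p ∈ ps, 0 ≤ p.1) : ∀ (seen : PySem.Set Int) (r : List String),
    pvFwd (ps.filter (fun p => !(PySem.Set.contains (PySem.Set.add seen i) p.1)))
        (PySem.List.pySetD r i v)
      = PySem.List.pySetD
          (pvFwd (ps.filter (fun p => !(PySem.Set.contains seen p.1))) r) i v := by
  induction ps with
  | nil => intro seen r; rfl
  | cons p ps ih =>
    intro seen r
    have hp0 := hpos p (by simp)
    have hpos' : ∀ q ∈ ps, 0 ≤ q.1 := fun q hq => hpos q (by simp [hq])
    have hcadd : PySem.Set.contains (PySem.Set.add seen i) p.1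
        = (decide (p.1 ∈ seen) || decide (p.1 = i)) := by
      by_cases hm : p.1 ∈ PySem.Set.add seen i
      · rw [(PySem.Set.contains_iff _ _).mpr hm]
        rcases (PySem.Set.mem_add _ _ _).mp hm with h1 | h1 <;> simp [h1]
      · have : PySem.Set.contains (PySem.Set.add seen i) p.1 = false := by
          cases hc : PySem.Set.contains (PySem.Set.add seen i) p.1
          · rfl
          · exact absurd ((PySem.Set.contains_iff _ _).mp hc) hm
        rw [this]
        rw [PySem.Set.mem_add] at hm
        push Not at hm
        simp [hm.1, hm.2]
    have hc : PySem.Set.contains seen p.1 = decide (p.1 ∈ seen) := by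
      by_cases hm : p.1 ∈ seen
      · rw [(PySem.Set.contains_iff _ _).mpr hm]; simp [hm]
      · cases hcc : PySem.Set.contains seen p.1
        · simp [hm]
        · exact absurd ((PySem.Set.contains_iff _ _).mp hcc) hm
    simp only [List.filter_cons, hcadd, hc]
    by_cases hmem : p.1 ∈ seen
    · rw [if_neg (show ¬ ((!(decide (p.1 ∈ seen) || decide (p.1 = i))) = true) by simp [hmem]),
          if_neg (show ¬ ((!decide (p.1 ∈ seen)) = true) by simp [hmem])]
      exact ih hpos' seen r
    · by_cases hpi : p.1 = i
      · rw [if_neg (show ¬ ((!(decide (p.1 ∈ seen) || decide (p.1 = i))) = true) by simp [hpi]),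
            if_pos (show (!decide (p.1 ∈ seen)) = true by simp [hmem])]
        simp only [pvFwd, List.foldl_cons]
        have := ih hpos' seen (PySem.List.pySetD r p.1 p.2)
        rw [show PySem.List.pySetD (PySem.List.pySetD r p.1 p.2) i v
              = PySem.List.pySetD r i v by
            rw [hpi, PySem.List.pySetD_of_nonneg _ _ hi, PySem.List.pySetD_of_nonneg _ _ hi,
                PySem.List.pySetD_of_nonneg _ _ hi, List.set_set]] at this
        exact this
      · rw [if_pos (show (!(decide (p.1 ∈ seen) || decide (p.1 = i))) = true by simp [hmem, hpi]),
            if_pos (show (!decide (p.1 ∈ seen)) = true by simp [hmem])]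
        simp only [pvFwd, List.foldl_cons]
        rw [show PySem.List.pySetD (PySem.List.pySetD r i v) p.1 p.2
              = PySem.List.pySetD (PySem.List.pySetD r p.1 p.2) i v by
            rw [PySem.List.pySetD_of_nonneg _ _ hi, PySem.List.pySetD_of_nonneg _ _ hp0,
                PySem.List.pySetD_of_nonneg _ _ hp0, PySem.List.pySetD_of_nonneg _ _ hi,
                List.set_comm _ _ (show i.toNat ≠ p.1.toNat by omega)]]
        exact ih hpos' seen (PySem.List.pySetD r p.1 p.2)

-- main reversal lemma: B's reverse first-write-wins loop over qs equals forward
-- last-write-wins over qs.reverse restricted to indices not already seen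
theorem pvRev_eq_fwd (qs : List (Int × String)) :
    ∀ (seen : PySem.Set Int) (r : List String), (∀ p ∈ qs, 0 ≤ p.1) →
    (qs.foldl (fun (st : PySem.Set Int × List String) p =>
        if PySem.Set.contains st.1 p.1 then st
        else (PySem.Set.add st.1 p.1, PySem.List.pySetD st.2 p.1 p.2)) (seen, r)).2
      = pvFwd (qs.reverse.filter (fun p => !(PySem.Set.contains seen p.1))) r := by
  induction qs with
  | nil => intro seen r _; rfl
  | cons q qs ih =>
    intro seen r hpos
    have hq0 := hpos q (by simp)
    have hpos' : ∀ p ∈ qs, 0 ≤ p.1 := fun p hp => hpos p (by simp [hp])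
    have hposrev : ∀ p ∈ qs.reverse, 0 ≤ p.1 := fun p hp => hpos' p (List.mem_reverse.mp hp)
    simp only [List.foldl_cons, List.reverse_cons, List.filter_append, List.filter_cons,
      List.filter_nil]
    by_cases hmem : q.1 ∈ seen
    · rw [if_pos ((PySem.Set.contains_iff _ _).mpr hmem)]
      have : PySem.Set.contains seen q.1 = true := (PySem.Set.contains_iff _ _).mpr hmem
      simp only [this, Bool.not_true, if_neg (by decide : ¬ (false = true)), List.append_nil]
      exact ih seen r hpos'
    · have hcf : PySem.Set.contains seen q.1 = false := by
        cases hc : PySem.Set.contains seen q.1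
        · rfl
        · exact absurd ((PySem.Set.contains_iff _ _).mp hc) hmem
      rw [if_neg (by rw [hcf]; decide)]
      simp only [hcf, Bool.not_false]
      rw [ih (PySem.Set.add seen q.1) (PySem.List.pySetD r q.1 q.2) hpos']
      rw [pvHide_set qs.reverse q.1 q.2 hq0 hposrev seen r]
      simp [pvFwd, List.foldl_append]

-- contains on the empty set is false
theorem pvContains_empty (x : Int) : PySem.Set.contains (PySem.Set.empty : PySem.Set Int) x = false := by
  cases hc : PySem.Set.contains (PySem.Set.empty : PySem.Set Int) x
  · rfl
  · have := (PySem.Set.contains_iff _ _).mp hc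
    simp [PySem.Set.empty] at this

-- folding a match over lines equals folding over the parsed overrides
theorem pvFoldl_filterMap {σ : Type} (L : List String) (n : Int)
    (g : σ → (Int × String) → σ) : ∀ (s : σ),
    L.foldl (fun s line => match pvParseLine? line n with
      | some a => g s a
      | none => s) s
      = (L.filterMap (fun line => pvParseLine? line n)).foldl g s := by
  induction L with
  | nil => intro s; rfl
  | cons l L ih =>
    intro s
    simp only [List.foldl_cons, List.filterMap_cons]
    cases h : pvParseLine? l n with
    | none => exact ih s
    | some a => simp only [List.foldl_cons]; exact ih (g s a)

-- ===== A-side lemmas (dict staging = forward direct assignment), from the dict's laws =====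
theorem pvKeys_insert (d : PySem.Dict Int String) (i : Int) (v : String) :
    (d.insert i v).keys = if d.contains i then d.keys else d.keys ++ [i] := by
  by_cases h : d.contains i
  · rw [if_pos h]
    simp only [PySem.Dict.keys, PySem.Dict.items_insert_of_contains d v h, List.map_map]
    apply List.map_congr_left
    intro p _
    simp only [Function.comp_apply]
    by_cases hp : p.1 = i
    · simp [hp]
    · simp [hp]
  · rw [if_neg h]
    simp only [PySem.Dict.keys, PySem.Dict.items_insert_of_not_contains d v (by simpa using h)]
    simp

theorem pvFoldl_map_update (ps : List (Int × String)) (i : Int) (v : String)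
    (hi : 0 ≤ i) :
    ∀ (r : List String), (ps.map Prod.fst).Nodup → (∀ p ∈ ps, 0 ≤ p.1) → i ∈ ps.map Prod.fst →
    pvFwd (ps.map (fun p => if p.1 == i then (i, v) else p)) r
      = PySem.List.pySetD (pvFwd ps r) i v := by
  induction ps with
  | nil => intro r _ _ hmem; simp at hmem
  | cons p ps ih =>
    intro r hnd hpos hmem
    simp only [List.map_cons, List.nodup_cons] at hnd ⊢
    by_cases hp : p.1 = i
    · rw [if_pos (by simp [hp])]
      have hnot : i ∉ ps.map Prod.fst := hp ▸ hnd.1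
      have hmap : ps.map (fun q => if q.1 == i then (i, v) else q) = ps := by
        have := List.map_congr_left (l := ps)
          (f := fun q => if q.1 == i then (i, v) else q) (g := id)
          (fun q hq => by
            have hne : q.1 ≠ i := fun e => hnot (e ▸ List.mem_map_of_mem hq)
            simp [hne])
        simpa using this
      rw [hmap, pvFwd_cons, pvFwd_cons,
          show PySem.List.pySetD r (i, v).1 (i, v).2
              = PySem.List.pySetD (PySem.List.pySetD r p.1 p.2) i v by
            rw [hp]; simp only [PySem.List.pySetD_of_nonneg _ _ hi, List.set_set],
          pvFoldl_set_comm ps i v hi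
            (fun q hq => ⟨(hpos q (by simp [hq])), fun e => hnot (e ▸ List.mem_map_of_mem hq)⟩)]
    · rw [if_neg (by simp [hp])]
      simp only [pvFwd, List.foldl_cons]
      exact ih (PySem.List.pySetD r p.1 p.2) hnd.2 (fun q hq => hpos q (by simp [hq]))
        (by rcases List.mem_cons.mp hmem with h1 | h1; exact absurd h1.symm hp; exact h1)

theorem pvApply_insert (d : PySem.Dict Int String) (i : Int) (v : String) (r : List String)
    (hnd : d.keys.Nodup) (hpos : ∀ k ∈ d.keys, 0 ≤ k) (hi : 0 ≤ i) :
    pvFwd (d.insert i v).items r = PySem.List.pySetD (pvFwd d.items r) i v := by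
  by_cases h : d.contains i
  · rw [PySem.Dict.items_insert_of_contains d v h]
    exact pvFoldl_map_update d.items i v hi r hnd (fun p hp => hpos p.1 (by
      simp only [PySem.Dict.keys]; exact List.mem_map_of_mem hp)) (by
      have := PySem.Dict.contains_eq_decide_mem_keys (d := d) (k := i)
      simp only [PySem.Dict.keys] at this ⊢
      rw [h] at this
      exact of_decide_eq_true this.symm)
  · rw [PySem.Dict.items_insert_of_not_contains d v (by simpa using h)]
    simp only [pvFwd, List.foldl_append]
    rfl

-- A's whole computation equals forward application of the parsed overrides
theorem pvMain (n : Int) (L : List String) : ∀ (d : PySem.Dict Int String) (r : List String),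
    d.keys.Nodup → (∀ k ∈ d.keys, 0 ≤ k) →
    pvFwd (L.foldl (fun revisions rawline =>
      let line := PySem.Str.strip rawline
      if (PySem.Str.startswith line "[" && PySem.Str.isIn "]" line) = true then
        let bracket_end := PySem.Str.find line "]"
        if bracket_end > 1 then
          let key := PySem.Str.strip (PySem.Str.slice line (some 1) (some bracket_end))
          let content_part := PySem.Str.strip (PySem.Str.slice line (some (bracket_end + 1)) none)
          if PySem.Str.strIsdigit key = true then
            match PySem.Int.ofStr? key with
            | some idx => if 0 ≤ idx ∧ idx < n then revisions.insert idx content_part else revisions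
            | none => revisions
          else revisions
        else revisions
      else revisions) d).items r
    = L.foldl (fun result line =>
        match pvParseLine? line n with
        | some a => PySem.List.pySetD result a.1 a.2
        | none => result) (pvFwd d.items r) := by
  induction L with
  | nil => intro d r _ _; rfl
  | cons l L ih =>
    intro d r hnd hpos
    simp only [List.foldl_cons]
    rw [pvLineA_eq n d l]
    cases h : pvParseLine? l n with
    | none =>
      dsimp only
      exact ih d r hnd hpos
    | some a =>
      dsimp only
      have hia := pvParseLine?_nonneg h
      have hc := PySem.Dict.contains_eq_decide_mem_keys (d := d) (k := a.1)
      have hnd' : (d.insert a.1 a.2).keys.Nodup := by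
        rw [pvKeys_insert]
        split_ifs with hcon
        · exact hnd
        · have hmem : a.1 ∉ d.keys := by
            intro hm
            rw [hc] at hcon
            simp [hm] at hcon
          rw [List.nodup_append]
          exact ⟨hnd, List.nodup_singleton _, by
            intro x hx y hy
            simp only [List.mem_singleton] at hy
            subst hy
            exact fun e => hmem (e ▸ hx)⟩
      have hpos' : ∀ k ∈ (d.insert a.1 a.2).keys, 0 ≤ k := by
        rw [pvKeys_insert]
        split_ifs with hcon
        · exact hpos
        · intro k hk
          rcases List.mem_append.mp hk with h1 | h1
          · exact hpos k h1
          · simp at h1; subst h1; exact hia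
      rw [← pvApply_insert d a.1 a.2 r hnd hpos hia]
      exact ih (d.insert a.1 a.2) r hnd' hpos'

-- ===== VERDICT (by name: the statement is the Claim_ definition above) =====
theorem parse_legacy_format_py_spec : Claim_equal_parse_legacy_format_py := by
  intro content original_paragraphs _
  unfold Spec_parse_legacy_format_py parse_legacy_format_py parse_legacy_format_py_alt
  set n : Int := (original_paragraphs.length : Int) with hn
  set L := PySem.Str.splitlines content with hL
  -- A = forward application of the parsed override list
  have hA : pvFwd (L.foldl (fun revisions rawline =>
      let line := PySem.Str.strip rawline
      if (PySem.Str.startswith line "[" && PySem.Str.isIn "]" line) = true then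
        let bracket_end := PySem.Str.find line "]"
        if bracket_end > 1 then
          let key := PySem.Str.strip (PySem.Str.slice line (some 1) (some bracket_end))
          let content_part := PySem.Str.strip (PySem.Str.slice line (some (bracket_end + 1)) none)
          if PySem.Str.strIsdigit key = true then
            match PySem.Int.ofStr? key with
            | some idx => if 0 ≤ idx ∧ idx < n then revisions.insert idx content_part else revisions
            | none => revisions
          else revisions
        else revisions
      else revisions) PySem.Dict.empty).items original_paragraphs
      = pvFwd (L.filterMap (fun line => pvParseLine? line n)) original_paragraphs := by
    rw [pvMain n L PySem.Dict.empty original_paragraphs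
      (by simp [PySem.Dict.keys, PySem.Dict.empty]) (by simp [PySem.Dict.keys, PySem.Dict.empty])]
    exact pvFoldl_filterMap L n (fun r a => PySem.List.pySetD r a.1 a.2) original_paragraphs
  -- B = the same forward application
  have hposq : ∀ p ∈ (L.reverse.filterMap (fun line => pvParseLine? line n)), 0 ≤ p.1 := by
    intro p hp
    rcases List.mem_filterMap.mp hp with ⟨l, _, hl⟩
    exact pvParseLine?_nonneg hl
  have hB : ((L.reverse.foldl (fun (st : PySem.Set Int × List String) line =>
      match pvParseLine? line n with
      | some a =>
        if PySem.Set.contains st.1 a.1 then st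
        else (PySem.Set.add st.1 a.1, PySem.List.pySetD st.2 a.1 a.2)
      | none => st) (PySem.Set.empty, original_paragraphs)).2)
      = pvFwd (L.filterMap (fun line => pvParseLine? line n)) original_paragraphs := by
    rw [pvFoldl_filterMap L.reverse n
      (fun (st : PySem.Set Int × List String) a =>
        if PySem.Set.contains st.1 a.1 then st
        else (PySem.Set.add st.1 a.1, PySem.List.pySetD st.2 a.1 a.2))
      (PySem.Set.empty, original_paragraphs)]
    rw [pvRev_eq_fwd _ PySem.Set.empty original_paragraphs hposq]
    rw [List.filterMap_reverse, List.reverse_reverse]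
    congr 1
    rw [List.filter_eq_self]
    intro p _
    rw [pvContains_empty p.1]
    rfl
  simp only [] at hA hB ⊢
  rw [hB]
  exact hA
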